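-- pv_equiv track=rewrite | github.com/ShrieVarshini2004/Leetcode | Test questions/Nxt_Wave_3.py | minimum_cost_under_length_constraint
-- ===== SOURCE A (Python) =====
-- def minimum_cost_under_length_constraint(pairs, k):
--     min_cost = {}
--
--     for length, cost in pairs:
--         if length <= k:
--             if length not in min_cost:
--                 min_cost[length] = cost
--             else:
--                 min_cost[length] = min(min_cost[length], cost)
--
--     return sum(min_cost.values())
-- ===== SOURCE B (Python) =====
-- def minimum_cost_under_length_constraint(pairs, k):
--     eligible = [(length, cost) for length, cost in pairs if length <= k]
--     total = 0
--     for length in dict.fromkeys(length for length, _ in eligible):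
--         total += min(cost for ln, cost in eligible if ln == length)
--     return total
-- ===== Notes on version B (the rewrite author's own statement) =====
-- stated objective: alternative
-- what changed: A builds a dict of per-length minima in one guarded pass and sums its values; B first filters the pairs to those with length <= k, takes the ordered dedup of their lengths, and for each distinct length runs a fresh min-scan over the filtered list, accumulating the sum.
import Mathlib
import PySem

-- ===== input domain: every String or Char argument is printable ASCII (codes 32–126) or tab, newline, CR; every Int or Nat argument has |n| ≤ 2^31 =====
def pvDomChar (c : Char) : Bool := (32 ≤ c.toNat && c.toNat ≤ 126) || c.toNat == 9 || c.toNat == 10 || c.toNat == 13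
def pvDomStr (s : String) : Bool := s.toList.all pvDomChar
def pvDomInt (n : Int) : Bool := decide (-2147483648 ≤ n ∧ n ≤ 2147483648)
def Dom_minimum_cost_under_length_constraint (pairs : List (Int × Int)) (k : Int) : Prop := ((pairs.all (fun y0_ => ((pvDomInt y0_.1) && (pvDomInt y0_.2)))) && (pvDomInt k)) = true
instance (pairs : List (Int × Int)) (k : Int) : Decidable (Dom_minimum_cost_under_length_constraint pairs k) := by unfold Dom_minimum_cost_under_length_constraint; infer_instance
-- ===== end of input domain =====

-- B replaces A's incrementally-updated dict of per-length minima by a filter of the eligible pairs,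
-- an ordered dedup of their lengths, and a fresh min-scan per distinct length (alternative decomposition, not faster).

-- ===== PORT A =====
-- body of A's loop for an eligible pair: first-time insert, else keep the minimum
def pvStepA (d : PySem.Dict Int Int) (p : Int × Int) : PySem.Dict Int Int :=
  if d.contains p.1 = false then d.insert p.1 p.2
  else d.insert p.1 (min (d.getD p.1 p.2) p.2)

def minimum_cost_under_length_constraint (pairs : List (Int × Int)) (k : Int) : Int :=
  let min_cost : PySem.Dict Int Int :=
    pairs.foldl (fun d p => if p.1 ≤ k then pvStepA d p else d) PySem.Dict.empty
  min_cost.values.sum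

-- ===== PORT B =====
-- Python's min(generator): the generator is nonempty whenever B evaluates it, so the .getD 0 default is unreachable
def pvMin (costs : List Int) : Int := (PySem.List.min? costs (fun y => y)).getD 0

def minimum_cost_under_length_constraint_alt (pairs : List (Int × Int)) (k : Int) : Int :=
  let eligible := pairs.filter (fun p => p.1 ≤ k)
  (PySem.List.dedup (eligible.map (·.1))).foldl
    (fun total l => total + pvMin ((eligible.filter (fun p => p.1 == l)).map (·.2))) 0

-- ===== PRECONDITION & SPEC =====
def Spec_minimum_cost_under_length_constraint (pairs : List (Int × Int)) (k : Int) (out : Int) : Prop := out = minimum_cost_under_length_constraint_alt pairs k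
instance (pairs : List (Int × Int)) (k : Int) (out : Int) : Decidable (Spec_minimum_cost_under_length_constraint pairs k out) := by unfold Spec_minimum_cost_under_length_constraint; infer_instance

-- ===== CLAIM (what is proved, stated in full; the proofs are below) =====
def Claim_equal_minimum_cost_under_length_constraint : Prop := ∀ (pairs : List (Int × Int)) (k : Int), Dom_minimum_cost_under_length_constraint pairs k → Spec_minimum_cost_under_length_constraint pairs k (minimum_cost_under_length_constraint pairs k)

-- ===== LEMMAS AND PROOFS =====
theorem pvMin_append (xs : List Int) (hx : xs ≠ []) (c : Int) :
    pvMin (xs ++ [c]) = min (pvMin xs) c := by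
  cases xs with
  | nil => simp at hx
  | cons x t =>
    simp [pvMin, List.cons_append, PySem.List.min?_id_cons, List.foldl_append]

def pvMins (e : List (Int × Int)) (l : Int) : Int :=
  pvMin ((e.filter (fun p => p.1 == l)).map (·.2))

theorem pvMins_append_ne (e : List (Int × Int)) (p : Int × Int) (l : Int) (h : l ≠ p.1) :
    pvMins (e ++ [p]) l = pvMins e l := by
  have : List.filter (fun q => q.1 == l) [p] = [] := by
    simp only [List.filter_cons, List.filter_nil, beq_iff_eq]
    rw [if_neg]; intro hc; exact h hc.symm
  simp [pvMins, List.filter_append, this]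

theorem pvMins_append_self_of_mem (e : List (Int × Int)) (p : Int × Int)
    (h : p.1 ∈ e.map (·.1)) :
    pvMins (e ++ [p]) p.1 = min (pvMins e p.1) p.2 := by
  have hne : (e.filter (fun q => q.1 == p.1)).map (·.2) ≠ [] := by
    simp only [ne_eq, List.map_eq_nil_iff, List.filter_eq_nil_iff]
    push Not
    obtain ⟨q, hq, hq1⟩ := List.mem_map.mp h
    exact ⟨q, hq, by simp [hq1]⟩
  simp [pvMins, List.filter_append, pvMin_append _ hne]

theorem pvMins_append_self_of_not_mem (e : List (Int × Int)) (p : Int × Int)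
    (h : p.1 ∉ e.map (·.1)) :
    pvMins (e ++ [p]) p.1 = p.2 := by
  have : e.filter (fun q => q.1 == p.1) = [] := by
    rw [List.filter_eq_nil_iff]
    intro q hq
    simp only [beq_iff_eq]
    intro hqe; exact h (List.mem_map.mpr ⟨q, hq, hqe⟩)
  simp [pvMins, List.filter_append, this, pvMin, PySem.List.min?_id_cons]

theorem items_fold (e : List (Int × Int)) :
    (e.foldl pvStepA PySem.Dict.empty).items
      = (PySem.List.dedup (e.map (·.1))).map (fun l => (l, pvMins e l)) := by
  induction e using List.reverseRecOn with
  | nil => rfl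
  | append_singleton e p ih =>
    have hkeys : (e.foldl pvStepA PySem.Dict.empty).keys = PySem.List.dedup (e.map (·.1)) := by
      simp only [PySem.Dict.keys, ih, List.map_map]
      simp [Function.comp_def]
    have hnodup : (e.foldl pvStepA PySem.Dict.empty).keys.Nodup := by
      rw [hkeys]; exact PySem.List.nodup_dedup _
    have hcontains : (e.foldl pvStepA PySem.Dict.empty).contains p.1
        = decide (p.1 ∈ e.map (·.1)) := by
      rw [PySem.Dict.contains_eq_decide_mem_keys, hkeys]
      simp
    rw [List.foldl_append, List.foldl_cons, List.foldl_nil]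
    by_cases hmem : p.1 ∈ e.map (·.1)
    · -- key present: insert replaces in place
      have hc : (e.foldl pvStepA PySem.Dict.empty).contains p.1 = true := by
        rw [hcontains]; simp [hmem]
      have hget : (e.foldl pvStepA PySem.Dict.empty).getD p.1 p.2 = pvMins e p.1 := by
        apply PySem.Dict.getD_of_mem_items _ ?_ hnodup
        rw [ih]
        exact List.mem_map.mpr ⟨p.1, by simp [hmem], rfl⟩
      rw [pvStepA, hc]
      simp only [Bool.true_eq_false, if_false]
      rw [PySem.Dict.items_insert_of_contains _ _ hc, ih, hget]
      have hded : PySem.List.dedup ((e ++ [p]).map (·.1)) = PySem.List.dedup (e.map (·.1)) := by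
        simp only [List.map_append, List.map_cons, List.map_nil, PySem.List.dedup_eq_ofList,
          PySem.Set.ofList_append_singleton]
        exact PySem.Set.add_of_mem (by simpa [PySem.Set.mem_ofList] using hmem)
      rw [hded, List.map_map]
      apply List.map_congr_left
      intro l hl
      by_cases hlp : l = p.1
      · subst hlp
        simp [pvMins_append_self_of_mem e p hmem]
      · simp only [Function.comp_apply, beq_iff_eq, hlp, if_false]
        rw [pvMins_append_ne e p l hlp]
    · have hc : (e.foldl pvStepA PySem.Dict.empty).contains p.1 = false := by
        rw [hcontains]; simp [hmem]
      rw [pvStepA, hc]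
      simp only [if_true]
      rw [PySem.Dict.items_insert_of_not_contains _ _ hc, ih]
      have hded : PySem.List.dedup ((e ++ [p]).map (·.1))
          = PySem.List.dedup (e.map (·.1)) ++ [p.1] := by
        simp only [List.map_append, List.map_cons, List.map_nil, PySem.List.dedup_eq_ofList,
          PySem.Set.ofList_append_singleton]
        exact PySem.Set.add_of_not_mem (by simpa [PySem.Set.mem_ofList] using hmem)
      rw [hded, List.map_append]
      congr 1
      · apply List.map_congr_left
        intro l hl
        have hlp : l ≠ p.1 := by
          rintro rfl
          exact hmem (by simpa [PySem.List.mem_dedup] using hl)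
        rw [pvMins_append_ne e p l hlp]
      · simp [pvMins_append_self_of_not_mem e p hmem]

-- concluding equality, used by the verdict theorem
theorem pv_main (pairs : List (Int × Int)) (k : Int) :
    minimum_cost_under_length_constraint pairs k = minimum_cost_under_length_constraint_alt pairs k := by
  unfold minimum_cost_under_length_constraint minimum_cost_under_length_constraint_alt
  rw [show (fun (d : PySem.Dict Int Int) p => if p.1 ≤ k then pvStepA d p else d)
        = (fun d p => if (fun q : Int × Int => decide (q.1 ≤ k)) p = true then pvStepA d p else d) by
      funext d p; simp]
  rw [← List.foldl_filter, PySem.List.foldl_add]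
  simp only [PySem.Dict.values, items_fold, List.map_map]
  simp [Function.comp_def, pvMins, List.filter_filter]

-- ===== VERDICT (by name: the statement is the Claim_ definition above) =====
theorem minimum_cost_under_length_constraint_spec : Claim_equal_minimum_cost_under_length_constraint := by
  intro pairs k _
  unfold Spec_minimum_cost_under_length_constraint
  exact pv_main pairs k
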